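-- pv_equiv track=rewrite | github.com/walkagain/chatbot | data_helper.py | extractSentencePairs
-- ===== SOURCE A (Python) =====
-- def extractSentencePairs(conversations):
--     qa_pairs = []
--     for conversation in conversations:
--         for i in range(len(conversation["lines"]) - 1):
--             inputLine = conversation["lines"][i]["text"].strip()
--             outputLine = conversation["lines"][i+1]["text"].strip()
--             if inputLine and outputLine:
--                 qa_pairs.append([inputLine, outputLine])
--     return qa_pairs
-- ===== SOURCE B (Python) =====
-- def extractSentencePairs(conversations):
--     qa_pairs = []
--     for conversation in conversations:
--         # stage 1: drop empty lines up front, remembering each kept line's position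
--         nonempty = []
--         for i, line in enumerate(conversation["lines"]):
--             text = line["text"].strip()
--             if text:
--                 nonempty.append((i, text))
--         # stage 2: join surviving neighbours whose positions are consecutive
--         for (i, a), (j, b) in zip(nonempty, nonempty[1:]):
--             if j == i + 1:
--                 qa_pairs.append([a, b])
--     return qa_pairs
-- ===== Notes on version B (the rewrite author's own statement) =====
-- stated objective: alternative
-- what changed: Instead of scanning all adjacent index pairs and testing both stripped texts, B first filters: it builds per conversation the list of (position, stripped text) for non-empty lines only, then joins neighbours in that filtered list whose positions are consecutive (j == i+1), so the emptiness tests disappear from the pairing pass.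
-- outside the precondition, e.g. on extractSentencePairs([{'lines': [{'note': 'x'}]}]): A returns [], B raises KeyError
import Mathlib
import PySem

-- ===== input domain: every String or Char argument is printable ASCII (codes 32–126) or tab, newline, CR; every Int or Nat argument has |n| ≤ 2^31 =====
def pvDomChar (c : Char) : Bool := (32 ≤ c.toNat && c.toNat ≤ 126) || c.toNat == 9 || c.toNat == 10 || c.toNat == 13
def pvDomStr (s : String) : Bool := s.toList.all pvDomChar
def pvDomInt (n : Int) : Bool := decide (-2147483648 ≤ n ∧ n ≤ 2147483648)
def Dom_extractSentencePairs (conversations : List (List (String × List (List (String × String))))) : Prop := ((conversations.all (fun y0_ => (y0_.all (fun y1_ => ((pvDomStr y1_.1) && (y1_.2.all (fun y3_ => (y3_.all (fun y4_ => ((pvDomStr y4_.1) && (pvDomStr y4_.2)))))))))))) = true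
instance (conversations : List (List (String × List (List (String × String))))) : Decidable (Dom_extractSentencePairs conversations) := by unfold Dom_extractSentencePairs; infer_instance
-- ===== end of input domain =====

-- B replaces A's scan over all adjacent index pairs (stripping each line twice and testing both texts)
-- by a filter-then-join pass: keep only (position, stripped text) of non-empty lines, then pair
-- neighbours of the filtered list whose positions are consecutive (objective: alternative).

-- ===== PORT A =====
-- Dict lookups that would raise KeyError in Python appear as `.getD` defaults; Pre_ excludes exactly those inputs.
def extractSentencePairs (conversations : List (List (String × List (List (String × String))))) : List (List String) :=
  conversations.foldl (fun qa conversation =>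
    let lines := ((PySem.Dict.mk conversation).get? "lines").getD []
    (PySem.List.pyRange 0 (PySem.List.len lines - 1) 1).foldl (fun qa i =>
      let inputLine := PySem.Str.strip (((PySem.Dict.mk (PySem.List.pyGetD lines i [])).get? "text").getD "")
      let outputLine := PySem.Str.strip (((PySem.Dict.mk (PySem.List.pyGetD lines (i + 1) [])).get? "text").getD "")
      if inputLine ≠ "" ∧ outputLine ≠ "" then qa ++ [[inputLine, outputLine]] else qa) qa) []

-- ===== PORT B =====
def extractSentencePairs_alt (conversations : List (List (String × List (List (String × String))))) : List (List String) :=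
  conversations.foldl (fun qa conversation =>
    let lines := ((PySem.Dict.mk conversation).get? "lines").getD []
    let nonempty := (PySem.List.enumerate lines).foldl (fun acc p =>
      let text := PySem.Str.strip (((PySem.Dict.mk p.2).get? "text").getD "")
      if text ≠ "" then acc ++ [(p.1, text)] else acc) []
    (nonempty.zip (nonempty.drop 1)).foldl (fun qa p =>
      if p.2.1 = p.1.1 + 1 then qa ++ [[p.1.2, p.2.2]] else qa) qa) []

-- ===== PRECONDITION & SPEC =====
-- Pre_ excludes the inputs where some conversation lacks the "lines" key or some line dict lacks the
-- "text" key: there Python A raises KeyError (except for a conversation with ≤1 text-less lines,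
-- where A returns an empty result but B's per-line stripping pass raises KeyError).
def Pre_extractSentencePairs (conversations : List (List (String × List (List (String × String))))) : Prop :=
  ∀ conversation ∈ conversations,
    ((PySem.Dict.mk conversation).get? "lines").isSome = true ∧
    ∀ line ∈ ((PySem.Dict.mk conversation).get? "lines").getD [],
      ((PySem.Dict.mk line).get? "text").isSome = true
instance (conversations : List (List (String × List (List (String × String))))) : Decidable (Pre_extractSentencePairs conversations) := by unfold Pre_extractSentencePairs; infer_instance

def pvWitness_extractSentencePairs : (List (List (String × List (List (String × String))))) :=
  [[("lines", [[("text", " hi ")], [("text", "there")], [("text", "  ")]])]]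

def Spec_extractSentencePairs (conversations : List (List (String × List (List (String × String))))) (out : List (List String)) : Prop := out = extractSentencePairs_alt conversations
instance (conversations : List (List (String × List (List (String × String))))) (out : List (List String)) : Decidable (Spec_extractSentencePairs conversations out) := by unfold Spec_extractSentencePairs; infer_instance

-- ===== CLAIM (what is proved, stated in full; the proofs are below) =====
def Claim_equal_extractSentencePairs : Prop := ∀ (conversations : List (List (String × List (List (String × String))))), Dom_extractSentencePairs conversations → Pre_extractSentencePairs conversations → Spec_extractSentencePairs conversations (extractSentencePairs conversations)

-- ===== LEMMAS AND PROOFS =====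

-- the canonical pair list of a list of stripped texts (both ports are proved equal to qa ++ pvPairs texts)
def pvPairs : List String → List (List String)
  | [] => []
  | [_] => []
  | a :: b :: r => (if a ≠ "" ∧ b ≠ "" then [[a, b]] else []) ++ pvPairs (b :: r)

-- the filtered (position, text) table B builds, in recursive form
def pvNE : Int → List String → List (Int × String)
  | _, [] => []
  | n, t :: r => if t ≠ "" then (n, t) :: pvNE (n + 1) r else pvNE (n + 1) r

theorem pvPairs_empty_head (ts : List String) : pvPairs ("" :: ts) = pvPairs ts := by
  cases ts <;> simp [pvPairs]

-- The index pairs (i, i+1) read by A's range loop are exactly the adjacent pairs of the list.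
theorem range_pair_map {α : Type} (ls : List α) (d : α) :
    (PySem.List.pyRange 0 (PySem.List.len ls - 1) 1).map
      (fun i => (PySem.List.pyGetD ls i d, PySem.List.pyGetD ls (i + 1) d)) = ls.zip (ls.drop 1) := by
  apply List.ext_getElem
  · simp [PySem.List.length_pyRange_one]
  · intro k h1 h2
    simp only [List.getElem_map, PySem.List.getElem_pyRange_one, List.getElem_zip, List.getElem_drop]
    have hk : k < ls.length - 1 := by
      simp [PySem.List.length_pyRange_one] at h1; omega
    refine Prod.ext ?_ ?_
    · rw [show ((0:Int) + k) = (k:Int) by omega, PySem.List.pyGetD_natCast]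
      exact List.getD_eq_getElem _ _ (by omega)
    · rw [show ((0:Int) + k + 1) = ((k+1:Nat):Int) by push_cast; ring, PySem.List.pyGetD_natCast]
      simp only [List.getD_eq_getElem _ _ (show k+1 < ls.length by omega)]
      congr 1; omega

-- A's per-conversation range loop equals a fold over the adjacent pairs of the stripped-text table.
theorem conv_fold {α : Type} (ls : List α) (d : α) (s : α → String) (qa : List (List String)) :
    (PySem.List.pyRange 0 (PySem.List.len ls - 1) 1).foldl (fun qa i =>
      if s (PySem.List.pyGetD ls i d) ≠ "" ∧ s (PySem.List.pyGetD ls (i+1) d) ≠ ""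
      then qa ++ [[s (PySem.List.pyGetD ls i d), s (PySem.List.pyGetD ls (i+1) d)]] else qa) qa
    = ((ls.map s).zip ((ls.map s).drop 1)).foldl (fun qa p =>
        if p.1 ≠ "" ∧ p.2 ≠ "" then qa ++ [[p.1, p.2]] else qa) qa := by
  rw [← List.map_drop, List.zip_map, ← range_pair_map ls d, List.foldl_map, List.foldl_map]
  rfl

-- A's fold over adjacent pairs computes the canonical pair list.
theorem zip_fold_pairs (ts : List String) : ∀ (qa : List (List String)),
    (ts.zip (ts.drop 1)).foldl (fun qa p =>
      if p.1 ≠ "" ∧ p.2 ≠ "" then qa ++ [[p.1, p.2]] else qa) qa = qa ++ pvPairs ts := by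
  induction ts with
  | nil => simp [pvPairs]
  | cons a tail IH =>
    cases tail with
    | nil => simp [pvPairs]
    | cons b r =>
      intro qa
      simp only [List.drop_succ_cons, List.drop_zero, List.zip_cons_cons, List.foldl_cons]
      rw [show (b :: r).drop 1 = r from rfl] at IH
      rw [IH]
      by_cases h : a ≠ "" ∧ b ≠ "" <;> simp [pvPairs, h, List.append_assoc]

-- B's filtering loop over enumerate builds pvNE.
theorem ne_fold {α : Type} (s : α → String) (ls : List α) : ∀ (n : Int) (acc : List (Int × String)),
    (PySem.List.enumerate ls n).foldl (fun acc p =>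
      if s p.2 ≠ "" then acc ++ [(p.1, s p.2)] else acc) acc = acc ++ pvNE n (ls.map s) := by
  induction ls with
  | nil => simp [PySem.List.enumerate_nil, pvNE]
  | cons x r IH =>
    intro n acc
    rw [PySem.List.enumerate_cons, List.foldl_cons, IH]
    by_cases h : s x ≠ "" <;> simp [pvNE, h, List.append_assoc]

-- B's join pass, started after a kept element `prev`, computes the canonical pair list.
theorem adj_ne (ts : List String) : ∀ (n : Int) (prev : Int × String) (qa : List (List String)),
    prev.1 ≤ n - 1 → (prev.1 = n - 1 → prev.2 ≠ "") →
    ((prev :: pvNE n ts).zip (pvNE n ts)).foldl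
      (fun qa p => if p.2.1 = p.1.1 + 1 then qa ++ [[p.1.2, p.2.2]] else qa) qa
    = qa ++ pvPairs ((if prev.1 = n - 1 then prev.2 else "") :: ts) := by
  induction ts with
  | nil =>
    intro n prev qa _ _
    simp only [pvNE, List.zip_nil_right, List.foldl_nil]
    split <;> simp [pvPairs]
  | cons t r IH =>
    intro n prev qa h1 h2
    by_cases ht : t = ""
    · subst ht
      rw [show pvNE n ("" :: r) = pvNE (n + 1) r by simp [pvNE]]
      rw [IH (n + 1) prev qa (by omega) (fun h => absurd h (by omega))]
      rw [if_neg (show ¬ prev.1 = n + 1 - 1 by omega)]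
      simp [pvPairs, pvPairs_empty_head]
    · rw [show pvNE n (t :: r) = (n, t) :: pvNE (n + 1) r by simp [pvNE, ht]]
      simp only [List.zip_cons_cons, List.foldl_cons]
      rw [IH (n + 1) (n, t) _ (by omega) (fun _ => ht)]
      by_cases hp : prev.1 = n - 1
      · simp [pvPairs, hp, h2 hp, ht, List.append_assoc]
      · simp [pvPairs, hp, show ¬ n = prev.1 + 1 by omega, ht]

-- B's join pass over the whole filtered table computes the canonical pair list.
theorem ne_fold_pairs (ts : List String) : ∀ (n : Int) (qa : List (List String)),
    ((pvNE n ts).zip ((pvNE n ts).drop 1)).foldl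
      (fun qa p => if p.2.1 = p.1.1 + 1 then qa ++ [[p.1.2, p.2.2]] else qa) qa
    = qa ++ pvPairs ts := by
  induction ts with
  | nil => simp [pvNE, pvPairs]
  | cons t r IH =>
    intro n qa
    by_cases ht : t = ""
    · subst ht
      rw [show pvNE n ("" :: r) = pvNE (n + 1) r by simp [pvNE]]
      rw [IH (n + 1) qa, pvPairs_empty_head]
    · rw [show pvNE n (t :: r) = (n, t) :: pvNE (n + 1) r by simp [pvNE, ht]]
      rw [show ((n, t) :: pvNE (n + 1) r).drop 1 = pvNE (n + 1) r from rfl]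
      rw [adj_ne r (n + 1) (n, t) qa (by omega) (fun _ => ht)]
      simp

-- ===== VERDICT (by name: the statement is the Claim_ definition above) =====
theorem extractSentencePairs_spec : Claim_equal_extractSentencePairs := by
  intro conversations _ _
  unfold Spec_extractSentencePairs extractSentencePairs extractSentencePairs_alt
  refine congrFun (congrFun (congrArg _ (funext fun qa => funext fun conversation => ?_)) []) conversations
  simp only []
  set s := fun line => PySem.Str.strip (((PySem.Dict.mk line).get? "text").getD "") with hs
  set ls := ((PySem.Dict.mk conversation).get? "lines").getD [] with hls
  calc (PySem.List.pyRange 0 (PySem.List.len ls - 1) 1).foldl (fun qa i =>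
        if s (PySem.List.pyGetD ls i []) ≠ "" ∧ s (PySem.List.pyGetD ls (i+1) []) ≠ ""
        then qa ++ [[s (PySem.List.pyGetD ls i []), s (PySem.List.pyGetD ls (i+1) [])]] else qa) qa
      = ((ls.map s).zip ((ls.map s).drop 1)).foldl (fun qa p =>
          if p.1 ≠ "" ∧ p.2 ≠ "" then qa ++ [[p.1, p.2]] else qa) qa := conv_fold ls [] s qa
    _ = qa ++ pvPairs (ls.map s) := zip_fold_pairs (ls.map s) qa
    _ = ((pvNE 0 (ls.map s)).zip ((pvNE 0 (ls.map s)).drop 1)).foldl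
          (fun qa p => if p.2.1 = p.1.1 + 1 then qa ++ [[p.1.2, p.2.2]] else qa) qa :=
        (ne_fold_pairs (ls.map s) 0 qa).symm
    _ = _ := by
        have hB : (PySem.List.enumerate ls).foldl (fun acc p =>
            if s p.2 ≠ "" then acc ++ [(p.1, s p.2)] else acc) [] = pvNE 0 (ls.map s) := by
          simpa using ne_fold s ls 0 []
        exact congrArg (fun l => (l.zip (l.drop 1)).foldl
          (fun qa p => if p.2.1 = p.1.1 + 1 then qa ++ [[p.1.2, p.2.2]] else qa) qa) hB.symm
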